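-- pv_equiv track=rewrite | github.com/cuponomia/dojo | area-histograma-2021-04-09/team2/application.py | get_all_water_volume
-- ===== SOURCE A (Python) =====
-- def get_all_water_volume(array):
--     volume= 0
--     last_bar = 0
--     last_index = 0
--     last_bar_minor = 0
--
--     for i in range(0, len(array)):
--         val = array[i]
--         if val > 0 and last_bar == 0:
--             last_bar = val
--             last_index = i
--         elif val >= last_bar and last_bar > 0:
--             volume += get_water_volume(array[last_index:i+1])
--         elif val > 0 and val < last_bar:
--             last_bar_minor = val
--
--     return volume
--
-- def get_smallest_column(array):
--     first = array[0]
--     last = array[-1]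
--     return min([last, first])
--
-- def get_water_volume(array):
--     smallest = get_smallest_column(array)
--     middle_bars = 0
--
--     bars = array[1:-1]
--     for bar_value in bars:
--         middle_bars += bar_value
--     volume = smallest * len(bars) - middle_bars
--
--     return volume
-- ===== SOURCE B (Python) =====
-- def get_all_water_volume(array):
--     # One pass with a running sum instead of re-summing each slice: O(n) vs A's O(n^2).
--     p = next((i for i, v in enumerate(array) if v > 0), None)
--     if p is None:
--         return 0
--     h = array[p]
--     volume = 0
--     run = 0  # sum of array[p+1 .. i-1]
--     for i in range(p + 1, len(array)):
--         v = array[i]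
--         if v >= h:
--             volume += h * (i - p - 1) - run
--         run += v
--     return volume
-- ===== Notes on version B (the rewrite author's own statement) =====
-- stated objective: faster
-- what changed: B finds the first positive bar once and keeps a running sum of the bars after it, turning each of A's per-hit slice-and-resum get_water_volume calls into an O(1) update.
import Mathlib
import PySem

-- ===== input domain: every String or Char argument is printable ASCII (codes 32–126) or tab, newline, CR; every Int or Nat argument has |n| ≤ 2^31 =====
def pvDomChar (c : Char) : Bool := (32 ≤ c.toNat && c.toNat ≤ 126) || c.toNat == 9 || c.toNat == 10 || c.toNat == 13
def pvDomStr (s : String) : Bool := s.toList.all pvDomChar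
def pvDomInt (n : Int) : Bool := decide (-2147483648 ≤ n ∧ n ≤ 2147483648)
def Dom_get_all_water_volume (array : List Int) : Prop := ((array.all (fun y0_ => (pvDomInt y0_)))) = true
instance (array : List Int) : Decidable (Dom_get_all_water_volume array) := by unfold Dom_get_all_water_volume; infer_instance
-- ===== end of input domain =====

-- B replaces A's per-hit slice-and-resum (O(n^2)) by one pass with a running prefix sum (O(n)).


-- ===== PORT A =====
-- get_smallest_column: A only calls it on lists of length ≥ 2, where array[0] / array[-1]
-- never raise; the pyGetD default 0 is unreachable there.
def get_smallest_column (array : List Int) : Int :=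
  let first := PySem.List.pyGetD array 0 0
  let last := PySem.List.pyGetD array (-1) 0
  min last first

def get_water_volume (array : List Int) : Int :=
  let smallest := get_smallest_column array
  let bars := PySem.List.slice array (some 1) (some (-1))
  let middle_bars := bars.foldl (· + ·) 0
  smallest * (bars.length : Int) - middle_bars

-- the body of A's `for i in range(0, len(array))` loop, on state (volume, last_bar, last_index, last_bar_minor)
def gawvStep (array : List Int) (st : Int × Int × Int × Int) (i : Int) : Int × Int × Int × Int :=
  let volume := st.1
  let last_bar := st.2.1
  let last_index := st.2.2.1
  let last_bar_minor := st.2.2.2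
  let val := PySem.List.pyGetD array i 0   -- i ∈ range(len), always in range
  if val > 0 ∧ last_bar = 0 then (volume, val, i, last_bar_minor)
  else if val ≥ last_bar ∧ last_bar > 0 then
    (volume + get_water_volume (PySem.List.slice array (some last_index) (some (i + 1))),
     last_bar, last_index, last_bar_minor)
  else if val > 0 ∧ val < last_bar then (volume, last_bar, last_index, val)
  else st

def get_all_water_volume (array : List Int) : Int :=
  ((PySem.List.pyRange 0 (array.length : Int) 1).foldl (gawvStep array) (0, 0, 0, 0)).1

-- ===== PORT B =====
-- the body of B's `for i in range(p + 1, len(array))` loop, on state (volume, run)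
def gawvAltStep (array : List Int) (h : Int) (p : Nat) (st : Int × Int) (i : Int) : Int × Int :=
  let v := PySem.List.pyGetD array i 0   -- i ∈ range(p+1, len), always in range
  ((if v ≥ h then st.1 + h * (i - (p : Int) - 1) - st.2 else st.1), st.2 + v)

def get_all_water_volume_alt (array : List Int) : Int :=
  match array.findIdx? (fun v => decide (0 < v)) with
  | none => 0
  | some p =>
    let h := array.getD p 0
    ((PySem.List.pyRange ((p : Int) + 1) (array.length : Int) 1).foldl
      (gawvAltStep array h p) (0, 0)).1

-- ===== PRECONDITION & SPEC =====
def Spec_get_all_water_volume (array : List Int) (out : Int) : Prop := out = get_all_water_volume_alt array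
instance (array : List Int) (out : Int) : Decidable (Spec_get_all_water_volume array out) := by unfold Spec_get_all_water_volume; infer_instance

-- ===== CLAIM (what is proved, stated in full; the proofs are below) =====
def Claim_equal_get_all_water_volume : Prop := ∀ (array : List Int), Dom_get_all_water_volume array → Spec_get_all_water_volume array (get_all_water_volume array)

-- ===== LEMMAS AND PROOFS =====

-- Before the first positive bar, A's loop leaves the initial state untouched.
lemma gawv_phase1 (array : List Int) (k : Nat) (hk : k ≤ array.length)
    (hnp : ∀ j (hj : j < array.length), j < k → array[j] ≤ 0) :
    (PySem.List.pyRange 0 (k : Int) 1).foldl (gawvStep array) (0, 0, 0, 0) = (0, 0, 0, 0) := by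
  induction k with
  | zero => simp [PySem.List.pyRange_one_eq_nil]
  | succ k ih =>
    have hcast : ((k + 1 : Nat) : Int) = (k : Int) + 1 := by push_cast; ring
    rw [hcast, PySem.List.pyRange_one_succ_right (by positivity), List.foldl_append,
      ih (by omega) (fun j hj hjk => hnp j hj (by omega))]
    have hk' : k < array.length := by omega
    have hval : PySem.List.pyGetD array (k : Int) 0 = array[k] := by
      rw [PySem.List.pyGetD_natCast, List.getD_eq_getElem _ _ hk']
    have hle : array[k] ≤ 0 := hnp k hk' (by omega)
    simp only [List.foldl_cons, List.foldl_nil, gawvStep, hval]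
    rw [if_neg (by omega), if_neg (by omega), if_neg (by omega)]

-- The per-hit term: the water volume of the slice from the first bar to an equal-or-higher
-- bar at index k is h·(k-p-1) minus the sum of the bars strictly between them.
lemma gwv_slice (array : List Int) (p k : Nat) (hpk : p < k) (hk : k < array.length)
    (hv : array[p]'(by omega) ≤ array[k]) :
    get_water_volume (PySem.List.slice array (some (p : Int)) (some ((k : Int) + 1)))
      = array[p]'(by omega) * ((k : Int) - (p : Int) - 1)
        - ((array.drop (p + 1)).take (k - (p + 1))).sum := by
  have hcast : ((k : Int) + 1) = ((k + 1 : Nat) : Int) := by push_cast; ring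
  rw [hcast, PySem.List.slice_natCast]
  set s := (array.drop p).take (k + 1 - p) with hs
  have hlen : s.length = k + 1 - p := by
    simp [hs, List.length_take, List.length_drop]; omega
  have hne : s ≠ [] := by
    intro h; rw [h] at hlen; simp at hlen; omega
  have hs0 : s[0]? = some (array[p]'(by omega)) := by
    rw [hs, List.getElem?_take_of_lt (by omega), List.getElem?_drop,
      List.getElem?_eq_getElem (by omega)]
    simp
  have hslast : s[s.length - 1]? = some (array[k]) := by
    rw [hs, hlen, List.getElem?_take_of_lt (by omega), List.getElem?_drop,
      List.getElem?_eq_getElem (by omega)]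
    congr 1; congr 1; omega
  have hfirst : PySem.List.pyGetD s 0 0 = array[p]'(by omega) := by
    rw [PySem.List.pyGetD_zero, List.getD_eq_getElem?_getD, hs0]; rfl
  have hlast : PySem.List.pyGetD s (-1) 0 = array[k] := by
    rw [PySem.List.pyGetD_neg_one _ _ hne, List.getLast_eq_getElem, List.getElem_eq_iff]
    exact hslast
  have hbars : PySem.List.slice s (some 1) (some (-1))
      = (array.drop (p + 1)).take (k - (p + 1)) := by
    simp only [PySem.List.slice, Int.reduceNeg, Order.lt_one_iff, PySem.List.clampIdx_neg_ofNat,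
      zero_le_one, PySem.List.clampIdx_of_nonneg, Int.toNat_one, List.drop_one]
    rw [hlen, hs]
    rw [List.drop_take, List.take_take, List.drop_drop]
    have e1 : min 1 (k + 1 - p) = 1 := by omega
    rw [e1]
    congr 1
    omega
  rw [get_water_volume, get_smallest_column, hbars]
  simp only [hfirst, hlast]
  rw [min_eq_right hv, ← List.sum_eq_foldl]
  have hblen : ((array.drop (p + 1)).take (k - (p + 1))).length = k - (p + 1) := by
    simp [List.length_take, List.length_drop]; omega
  rw [hblen]
  have hc2 : ((k - (p + 1) : Nat) : Int) = (k : Int) - (p : Int) - 1 := by omega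
  rw [hc2]

-- After the first positive bar, A's loop and B's loop accumulate the same volume.
lemma gawv_phase2 (array : List Int) (p : Nat) (hp : p < array.length)
    (hpos : 0 < array[p]) :
    ∀ (t k : Nat), p < k → array.length ≤ k + t →
    ∀ (V m W run : Int), run = ((array.drop (p + 1)).take (k - (p + 1))).sum →
    ((PySem.List.pyRange (k : Int) (array.length : Int) 1).foldl (gawvStep array)
        (V, array[p], (p : Int), m)).1
      = V + ((PySem.List.pyRange (k : Int) (array.length : Int) 1).foldl
          (gawvAltStep array array[p] p) (W, run)).1 - W := by
  intro t
  induction t with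
  | zero =>
    intro k hpk hkt V m W run hrun
    rw [PySem.List.pyRange_one_eq_nil (by exact_mod_cast hkt)]
    simp
  | succ t ih =>
    intro k hpk hkt V m W run hrun
    by_cases hkn : array.length ≤ k
    · rw [PySem.List.pyRange_one_eq_nil (by exact_mod_cast hkn)]
      simp
    · have hk : k < array.length := by omega
      rw [PySem.List.pyRange_one_cons (by exact_mod_cast hk)]
      simp only [List.foldl_cons]
      have hval : PySem.List.pyGetD array (k : Int) 0 = array[k] := by
        rw [PySem.List.pyGetD_natCast, List.getD_eq_getElem _ _ hk]
      have hcast : (k : Int) + 1 = ((k + 1 : Nat) : Int) := by push_cast; ring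
      have hrun' : run + array[k]
          = ((array.drop (p + 1)).take (k + 1 - (p + 1))).sum := by
        have h1 : k + 1 - (p + 1) = (k - (p + 1)) + 1 := by omega
        have h2 : (array.drop (p + 1))[k - (p + 1)]?
            = some array[k] := by
          rw [List.getElem?_drop, List.getElem?_eq_getElem (by omega)]
          congr 1; congr 1; omega
        rw [h1, List.take_succ, List.sum_append, h2, hrun]
        simp
      -- evaluate one step of each loop
      rw [gawvStep, gawvAltStep]
      simp only [hval]
      rw [if_neg (by push_neg; intro _; omega)]
      by_cases hge : array[k] ≥ array[p]
      · rw [if_pos ⟨hge, hpos⟩, if_pos hge]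
        rw [gwv_slice array p k hpk hk hge, ← hrun, hcast]
        rw [ih (k + 1) (by omega) (by omega)
          (V + (array[p] * ((k : Int) - (p : Int) - 1) - run)) m
          (W + array[p] * ((k : Int) - (p : Int) - 1) - run) (run + array[k]) hrun']
        ring
      · rw [if_neg (by push_neg; intro h; omega), if_neg hge]
        by_cases hlt : array[k] > 0 ∧ array[k] < array[p]
        · rw [if_pos hlt, hcast,
            ih (k + 1) (by omega) (by omega) V array[k] W _ (by rw [← hrun'])]
        · rw [if_neg hlt, hcast,
            ih (k + 1) (by omega) (by omega) V m W _ (by rw [← hrun'])]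

-- ===== VERDICT (by name: the statement is the Claim_ definition above) =====
theorem get_all_water_volume_spec : Claim_equal_get_all_water_volume := by
  intro array _
  unfold Spec_get_all_water_volume get_all_water_volume get_all_water_volume_alt
  cases hfi : array.findIdx? (fun v => decide (0 < v)) with
  | none =>
    rw [List.findIdx?_eq_none_iff] at hfi
    rw [gawv_phase1 array array.length le_rfl
      (fun j hj _ => by simpa using hfi array[j] (List.getElem_mem hj))]
  | some p =>
    rw [List.findIdx?_eq_some_iff_getElem] at hfi
    obtain ⟨hp, hpos, hpre⟩ := hfi
    simp only [decide_eq_true_eq] at hpos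
    have hsplit : PySem.List.pyRange 0 (array.length : Int) 1
        = PySem.List.pyRange 0 (p : Int) 1 ++ ((p : Int) :: PySem.List.pyRange ((p : Int) + 1) (array.length : Int) 1) := by
      rw [← PySem.List.pyRange_one_cons (by exact_mod_cast hp),
        ← PySem.List.pyRange_one_append 0 (p : Int) (array.length : Int) (by positivity) (by exact_mod_cast hp.le)]
    rw [hsplit, List.foldl_append,
      gawv_phase1 array p hp.le (fun j hj hjp => by
        have := hpre j hjp; simp only [decide_eq_true_eq] at this; omega)]
    simp only [List.foldl_cons]
    have hvalp : PySem.List.pyGetD array (p : Int) 0 = array[p] := by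
      rw [PySem.List.pyGetD_natCast, List.getD_eq_getElem _ _ hp]
    rw [gawvStep]
    simp only [hvalp]
    rw [if_pos (show array[p] > 0 ∧ True from ⟨hpos, trivial⟩)]
    have hgd : array.getD p 0 = array[p] := List.getD_eq_getElem _ _ hp
    simp only [hgd]
    have hc2 : ((p : Int) + 1) = ((p + 1 : Nat) : Int) := by push_cast; ring
    rw [hc2, gawv_phase2 array p hp hpos array.length (p + 1) (by omega) (by omega) 0 0 0 0 (by simp)]
    ring
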